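-- pv_equiv track=rewrite | github.com/amyamyloyd/imlaw | model_analysis/analyze_form_fields.py | _extract_persona
-- ===== SOURCE A (Python) =====
-- from typing import Dict, List, Set, Tuple
--
-- def _extract_persona(field_id: str, tooltip: str = None, parent_field: Dict = None) -> str:
--     """Extract persona from field context"""
--     # Volag override
--     if (field_id and 'volag' in field_id.lower()) or (tooltip and 'volag' in tooltip.lower()):
--         return 'preparer'
--     if not tooltip:
--         return None
--     ttip = tooltip.lower()
--     # 1. Beneficiary
--     if 'beneficiary' in ttip:
--         return 'beneficiary'
--     # 2. Family Member (child)
--     if 'your child' in ttip or 'your children' in ttip: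
--         return 'family_member'
--     # 3. Spouse
--     if 'spouse' in ttip:
--         return 'spouse'
--     # 4. Parent
--     if 'father' in ttip or 'mother' in ttip or 'parent' in ttip:
--         return 'parent'
--     # 5. Preparer
--     if 'preparer' in ttip:
--         return 'preparer'
--     # 6. Employer
--     if 'employer' in ttip:
--         return 'employer'
--     # 7. Applicant
--     if (('applicant' in ttip or 'you' in ttip or 'your' in ttip) and
--         not any(x in ttip for x in ['your child', 'your children', 'spouse', 'parent', 'father', 'mother', 'beneficiary', 'employer', 'preparer'])):
--         return 'applicant'
--     # 8. Family (general)
--     if 'family' in ttip and not any(x in ttip for x in ['beneficiary', 'spouse', 'parent', 'father', 'mother']):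
--         return 'family'
--     return None
-- ===== SOURCE B (Python) =====
-- # All of A's exclusion lists are redundant given rule order (an excluded keyword would
-- # have triggered an earlier rule), 'your children' contains 'your child' and 'your'
-- # contains 'you', so the whole chain collapses to a flat first-match keyword->label list.
-- _KEYWORD_LABELS = [
--     ('beneficiary', 'beneficiary'),
--     ('your child', 'family_member'),
--     ('spouse', 'spouse'),
--     ('father', 'parent'),
--     ('mother', 'parent'),
--     ('parent', 'parent'),
--     ('preparer', 'preparer'),
--     ('employer', 'employer'),
--     ('applicant', 'applicant'),
--     ('you', 'applicant'),
--     ('family', 'family'),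
-- ]
--
-- def _extract_persona(field_id: str, tooltip: str = None, parent_field: dict = None) -> str:
--     if (field_id and 'volag' in field_id.lower()) or (tooltip and 'volag' in tooltip.lower()):
--         return 'preparer'
--     if not tooltip:
--         return None
--     t = tooltip.lower()
--     return next((label for kw, label in _KEYWORD_LABELS if kw in t), None)
-- ===== Notes on version B (the rewrite author's own statement) =====
-- stated objective: simpler
-- what changed: B drops all of A's exclusion lists and the two duplicate keywords (the plural child phrase and the possessive pronoun, each of which contains a kept keyword as a substring), which are provably redundant given A's rule order, collapsing the eight guarded branches into a flat first-match scan over eleven keyword-to-label pairs.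
import Mathlib
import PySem

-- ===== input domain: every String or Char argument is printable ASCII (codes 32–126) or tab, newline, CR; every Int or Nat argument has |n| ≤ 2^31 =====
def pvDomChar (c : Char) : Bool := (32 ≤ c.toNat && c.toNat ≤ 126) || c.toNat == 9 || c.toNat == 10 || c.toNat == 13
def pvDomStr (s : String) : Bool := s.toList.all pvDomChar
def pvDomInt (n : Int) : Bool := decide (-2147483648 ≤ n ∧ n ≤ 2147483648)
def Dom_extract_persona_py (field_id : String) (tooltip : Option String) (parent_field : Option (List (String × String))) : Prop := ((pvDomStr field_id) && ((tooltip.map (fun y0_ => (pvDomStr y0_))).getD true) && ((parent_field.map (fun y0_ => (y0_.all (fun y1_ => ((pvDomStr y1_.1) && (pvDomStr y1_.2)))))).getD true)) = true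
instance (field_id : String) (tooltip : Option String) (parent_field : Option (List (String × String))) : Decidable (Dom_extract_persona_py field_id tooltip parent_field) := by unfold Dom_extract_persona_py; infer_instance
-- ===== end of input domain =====

-- B is simpler: A's exclusion lists and duplicate keywords are redundant given rule order
-- ('your children' contains 'your child', 'your' contains 'you', and every excluded keyword
-- would have fired an earlier rule), so B is a flat first-match keyword->label scan.


-- ===== PORT A =====
def extract_persona_py (field_id : String) (tooltip : Option String) (parent_field : Option (List (String × String))) : Option String :=
  -- Volag override
  if (field_id != "" && PySem.Str.isIn "volag" (PySem.Str.lower field_id)) ||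
     (match tooltip with
      | none => false
      | some t => t != "" && PySem.Str.isIn "volag" (PySem.Str.lower t)) then
    some "preparer"
  else
    match tooltip with
    | none => none
    | some t =>
      if t == "" then none
      else
        let ttip := PySem.Str.lower t
        -- 1. Beneficiary
        if PySem.Str.isIn "beneficiary" ttip then some "beneficiary"
        -- 2. Family Member (child)
        else if PySem.Str.isIn "your child" ttip || PySem.Str.isIn "your children" ttip then some "family_member"
        -- 3. Spouse
        else if PySem.Str.isIn "spouse" ttip then some "spouse"
        -- 4. Parent
        else if PySem.Str.isIn "father" ttip || PySem.Str.isIn "mother" ttip || PySem.Str.isIn "parent" ttip then some "parent"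
        -- 5. Preparer
        else if PySem.Str.isIn "preparer" ttip then some "preparer"
        -- 6. Employer
        else if PySem.Str.isIn "employer" ttip then some "employer"
        -- 7. Applicant
        else if (PySem.Str.isIn "applicant" ttip || PySem.Str.isIn "you" ttip || PySem.Str.isIn "your" ttip) &&
                !(["your child", "your children", "spouse", "parent", "father", "mother", "beneficiary", "employer", "preparer"].any
                   (fun x => PySem.Str.isIn x ttip)) then some "applicant"
        -- 8. Family (general)
        else if PySem.Str.isIn "family" ttip &&
                !(["beneficiary", "spouse", "parent", "father", "mother"].any
                   (fun x => PySem.Str.isIn x ttip)) then some "family"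
        else none

-- ===== PORT B =====
-- the flat keyword -> label list of Source B
def pvKeywordLabels : List (String × String) :=
  [ ("beneficiary", "beneficiary"),
    ("your child", "family_member"),
    ("spouse", "spouse"),
    ("father", "parent"),
    ("mother", "parent"),
    ("parent", "parent"),
    ("preparer", "preparer"),
    ("employer", "employer"),
    ("applicant", "applicant"),
    ("you", "applicant"),
    ("family", "family") ]

-- next((label for kw, label in _KEYWORD_LABELS if kw in t), None)
def pvFirstMatch (f : String → Bool) : List (String × String) → Option String
  | [] => none
  | (kw, lab) :: rest => if f kw then some lab else pvFirstMatch f rest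

def extract_persona_py_alt (field_id : String) (tooltip : Option String) (parent_field : Option (List (String × String))) : Option String :=
  if (field_id != "" && PySem.Str.isIn "volag" (PySem.Str.lower field_id)) ||
     (match tooltip with
      | none => false
      | some t => t != "" && PySem.Str.isIn "volag" (PySem.Str.lower t)) then
    some "preparer"
  else
    match tooltip with
    | none => none
    | some t =>
      if t == "" then none
      else
        let tt := PySem.Str.lower t
        pvFirstMatch (fun k => PySem.Str.isIn k tt) pvKeywordLabels

-- ===== PRECONDITION & SPEC =====
def Spec_extract_persona_py (field_id : String) (tooltip : Option String) (parent_field : Option (List (String × String))) (out : Option String) : Prop := out = extract_persona_py_alt field_id tooltip parent_field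
instance (field_id : String) (tooltip : Option String) (parent_field : Option (List (String × String))) (out : Option String) : Decidable (Spec_extract_persona_py field_id tooltip parent_field out) := by unfold Spec_extract_persona_py; infer_instance

-- ===== CLAIM =====
def Claim_equal_extract_persona_py : Prop := ∀ (field_id : String) (tooltip : Option String) (parent_field : Option (List (String × String))), Dom_extract_persona_py field_id tooltip parent_field → Spec_extract_persona_py field_id tooltip parent_field (extract_persona_py field_id tooltip parent_field)

-- ===== LEMMAS AND PROOFS =====
-- Both cores depend on the tooltip only through which keywords occur in it; abstracting the
-- membership test as f, the chain equals the flat scan, using only that 'your children' implies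
-- 'your child' and 'your' implies 'you' (substring containments) — the exclusion lists of rules
-- 7 and 8 are then always false when reached, because each excluded keyword fires an earlier rule.
theorem pv_core_eq (f : String → Bool)
    (hchild : f "your children" = true → f "your child" = true)
    (hyou : f "your" = true → f "you" = true) :
    (if f "beneficiary" then some "beneficiary"
     else if f "your child" || f "your children" then some "family_member"
     else if f "spouse" then some "spouse"
     else if f "father" || f "mother" || f "parent" then some "parent"
     else if f "preparer" then some "preparer"
     else if f "employer" then some "employer"
     else if (f "applicant" || f "you" || f "your") &&
             !(["your child", "your children", "spouse", "parent", "father", "mother", "beneficiary", "employer", "preparer"].any f) then some "applicant"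
     else if f "family" && !(["beneficiary", "spouse", "parent", "father", "mother"].any f) then some "family"
     else none) =
    pvFirstMatch f pvKeywordLabels := by
  simp only [pvFirstMatch, pvKeywordLabels, List.any_cons, List.any_nil]
  by_cases h1 : f "beneficiary" = true
  · simp [h1]
  by_cases h2 : f "your child" = true
  · simp [h1, h2]
  have h2' : f "your children" = false := by
    cases hv : f "your children"
    · rfl
    · exact absurd (hchild hv) (by simpa using h2)
  by_cases h3 : f "spouse" = true
  · simp [h1, h2, h2', h3]
  by_cases h4 : f "father" = true
  · simp [h1, h2, h2', h3, h4]
  by_cases h5 : f "mother" = true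
  · simp [h1, h2, h2', h3, h4, h5]
  by_cases h6 : f "parent" = true
  · simp [h1, h2, h2', h3, h4, h5, h6]
  by_cases h7 : f "preparer" = true
  · simp [h1, h2, h2', h3, h4, h5, h6, h7]
  by_cases h8 : f "employer" = true
  · simp [h1, h2, h2', h3, h4, h5, h6, h7, h8]
  by_cases h9 : f "applicant" = true
  · simp [h1, h2, h2', h3, h4, h5, h6, h7, h8, h9]
  by_cases h10 : f "you" = true
  · simp [h1, h2, h2', h3, h4, h5, h6, h7, h8, h9, h10]
  have h10' : f "your" = false := by
    cases hv : f "your"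
    · rfl
    · exact absurd (hyou hv) (by simpa using h10)
  simp [h1, h2, h2', h3, h4, h5, h6, h7, h8, h9, h10, h10']

-- ===== VERDICT =====
set_option maxHeartbeats 2000000 in
theorem extract_persona_py_spec : Claim_equal_extract_persona_py := by
  intro field_id tooltip parent_field _
  unfold Spec_extract_persona_py extract_persona_py extract_persona_py_alt
  cases tooltip with
  | none => rfl
  | some t =>
    dsimp only
    congr 1
    congr 1
    refine pv_core_eq (fun k => PySem.Str.isIn k (PySem.Str.lower t)) ?_ ?_
    · intro h
      rw [PySem.Str.isIn_iff_infix] at h ⊢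
      exact List.IsInfix.trans ⟨[], ['r','e','n'], rfl⟩ h
    · intro h
      rw [PySem.Str.isIn_iff_infix] at h ⊢
      exact List.IsInfix.trans ⟨[], ['r'], rfl⟩ h
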